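-- pv_equiv track=rewrite | github.com/CorwynRavenwing/classes | python/hackerrank/algorithms/count_strings.py | NFA_letters_available
-- ===== SOURCE A (Python) =====
-- def NFA_letters_available(NFA_transitions, fromStates):
--     letters = [
--         L
--         for (fS, L, tS) in NFA_transitions
--         if fS in fromStates
--     ]
--     letters = list(sorted(list(set(letters))))
--     return letters
-- ===== SOURCE B (Python) =====
-- def NFA_letters_available(NFA_transitions, fromStates):
--     index = {}
--     for (fS, L, tS) in NFA_transitions:
--         index.setdefault(fS, []).append(L)
--     acc = set()
--     for fS in fromStates:
--         acc.update(index.get(fS, []))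
--     return sorted(acc)
-- ===== Notes on version B (the rewrite author's own statement) =====
-- stated objective: alternative
-- what changed: B builds a source-state index (dict state -> outgoing letters) in one pass over the transitions and then answers by unioning the letter lists of the requested states, instead of scanning all transitions with a membership test against fromStates.
import Mathlib
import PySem

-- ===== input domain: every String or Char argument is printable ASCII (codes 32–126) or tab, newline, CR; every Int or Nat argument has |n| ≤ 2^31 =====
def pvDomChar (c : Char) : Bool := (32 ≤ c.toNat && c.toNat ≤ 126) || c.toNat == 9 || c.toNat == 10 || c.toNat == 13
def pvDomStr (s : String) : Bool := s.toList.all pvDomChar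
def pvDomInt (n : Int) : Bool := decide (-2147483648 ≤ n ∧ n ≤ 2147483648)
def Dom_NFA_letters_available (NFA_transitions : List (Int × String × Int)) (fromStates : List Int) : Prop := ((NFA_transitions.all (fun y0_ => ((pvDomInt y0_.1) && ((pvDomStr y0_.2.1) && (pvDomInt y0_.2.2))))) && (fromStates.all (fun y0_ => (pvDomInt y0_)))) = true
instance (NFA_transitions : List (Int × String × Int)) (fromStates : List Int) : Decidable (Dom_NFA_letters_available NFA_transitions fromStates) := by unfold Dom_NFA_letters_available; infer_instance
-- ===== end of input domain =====

-- B replaces A's scan-all-transitions-and-test-membership with an index (dict source state -> outgoing letters)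
-- built in one pass, then queried once per requested state; same sorted unique letter list (objective: alternative).

-- ===== PORT A =====
def NFA_letters_available (NFA_transitions : List (Int × String × Int)) (fromStates : List Int) : List String :=
  let letters :=
    (NFA_transitions.filter (fun t => fromStates.contains t.1)).map (fun t => t.2.1)
  PySem.List.sorted (PySem.Set.ofList letters) (fun x => x) false

-- ===== PORT B =====
def NFA_letters_available_alt (NFA_transitions : List (Int × String × Int)) (fromStates : List Int) : List String :=
  let index : PySem.Dict Int (List String) :=
    NFA_transitions.foldl (fun d t => d.modify t.1 [] (fun ls => ls ++ [t.2.1])) PySem.Dict.empty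
  let acc : PySem.Set String :=
    fromStates.foldl (fun s fS => PySem.Set.update s (index.getD fS [])) PySem.Set.empty
  PySem.List.sorted acc (fun x => x) false

-- ===== PRECONDITION & SPEC =====
def Spec_NFA_letters_available (NFA_transitions : List (Int × String × Int)) (fromStates : List Int) (out : List String) : Prop := out = NFA_letters_available_alt NFA_transitions fromStates
instance (NFA_transitions : List (Int × String × Int)) (fromStates : List Int) (out : List String) : Decidable (Spec_NFA_letters_available NFA_transitions fromStates out) := by unfold Spec_NFA_letters_available; infer_instance

-- ===== CLAIM (what is proved, stated in full; the proofs are below) =====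
def Claim_equal_NFA_letters_available : Prop := ∀ (NFA_transitions : List (Int × String × Int)) (fromStates : List Int), Dom_NFA_letters_available NFA_transitions fromStates → Spec_NFA_letters_available NFA_transitions fromStates (NFA_letters_available NFA_transitions fromStates)

-- ===== LEMMAS AND PROOFS =====

-- membership in B's accumulator fold
theorem mem_acc_fold (g : Int → List String) (qs : List Int) (s : PySem.Set String) (x : String) :
    (x ∈ qs.foldl (fun s fS => PySem.Set.update s (g fS)) s) ↔ x ∈ s ∨ ∃ q ∈ qs, x ∈ g q := by
  induction qs generalizing s with
  | nil => simp
  | cons q qs ih =>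
    rw [List.foldl_cons, ih, PySem.Set.mem_update]
    simp only [List.mem_cons, exists_eq_or_imp, or_assoc]

theorem nodup_acc_fold (g : Int → List String) (qs : List Int) (s : PySem.Set String)
    (h : s.Nodup) : (qs.foldl (fun s fS => PySem.Set.update s (g fS)) s).Nodup := by
  induction qs generalizing s with
  | nil => exact h
  | cons q qs ih => exact ih _ (PySem.Set.nodup_update _ _ h)

-- B's index lookup is exactly the letters leaving fS, in transition order
theorem index_getD (ts : List (Int × String × Int)) (fS : Int) :
    (ts.foldl (fun d t => d.modify t.1 [] (fun ls => ls ++ [t.2.1])) PySem.Dict.empty).getD fS []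
      = (ts.filter (fun t => t.1 == fS)).map (fun t => t.2.1) := by
  have h := PySem.Dict.getD_foldl_modify_append (l := ts.map (fun t => (t.1, t.2.1)))
      (d := PySem.Dict.empty) (c := fS)
  rw [List.foldl_map] at h
  simp only [h]
  simp [List.filter_map, Function.comp_def]

theorem NFA_letters_available_eq_alt (ts : List (Int × String × Int)) (fromStates : List Int) :
    NFA_letters_available ts fromStates = NFA_letters_available_alt ts fromStates := by
  unfold NFA_letters_available NFA_letters_available_alt
  apply PySem.List.sorted_eq_sorted_of_perm _ _ _ (fun a b h => h)
  apply (List.perm_ext_iff_of_nodup (PySem.Set.nodup_ofList _) _).mpr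
  · intro x
    rw [PySem.Set.mem_ofList, mem_acc_fold]
    simp only [List.mem_map, List.mem_filter, index_getD, List.mem_map, List.mem_filter]
    constructor
    · rintro ⟨t, ⟨ht, hc⟩, rfl⟩
      exact Or.inr ⟨t.1, by simpa using hc, t, ⟨ht, by simp⟩, rfl⟩
    · rintro (h | ⟨q, hq, t, ⟨ht, he⟩, rfl⟩)
      · simp at h
      · exact ⟨t, ⟨ht, by simp_all⟩, rfl⟩
  · exact nodup_acc_fold _ _ _ List.nodup_nil

-- ===== VERDICT (by name: the statement is the Claim_ definition above) =====
theorem NFA_letters_available_spec : Claim_equal_NFA_letters_available := by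
  intro ts fs _
  exact NFA_letters_available_eq_alt ts fs
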